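-- pv_equiv track=rewrite | github.com/TanvirSalehin/VacationProjects | pytest/test_password_detector.py | destructure
-- ===== SOURCE A (Python) =====
-- def destructure(string):
-- 	special = ["@", "!", "#", "$", "%", "^", "&", "*", "(", ")", "{", "}", "[", "]", '"', "'", "?", "<", "/", ">", "|", "+", "=", "-", "_", "`", "~", ";", ":", ",", "."]
-- 	numCount = 0
-- 	specialCount = 0
-- 	charCount = 0
-- 	for char in string:
-- 		try:
-- 			if int(char) != char:
-- 				numCount += 1
-- 		except ValueError:
-- 			pass
-- 			if char in special:
-- 				specialCount += 1
-- 			else: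
-- 				charCount += 1
--
-- 	return numCount, specialCount, charCount
-- ===== SOURCE B (Python) =====
-- def destructure(string):
--     special = set("@!#$%^&*(){}[]\"'?</>|+=-_`~;:,.")
--
--     def is_int(ch):
--         try:
--             int(ch)
--             return True
--         except ValueError:
--             return False
--
--     numCount = sum(1 for ch in string if is_int(ch))
--     specialCount = sum(1 for ch in string if not is_int(ch) and ch in special)
--     return numCount, specialCount, len(string) - numCount - specialCount
-- ===== Notes on version B (the rewrite author's own statement) =====
-- stated objective: idiomatic
-- what changed: B replaces A's single three-accumulator loop by staged counting: one filtered count for int()-parsable characters, one for non-int special characters, and derives the third class arithmetically as len(string) minus the other two.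
import Mathlib
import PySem

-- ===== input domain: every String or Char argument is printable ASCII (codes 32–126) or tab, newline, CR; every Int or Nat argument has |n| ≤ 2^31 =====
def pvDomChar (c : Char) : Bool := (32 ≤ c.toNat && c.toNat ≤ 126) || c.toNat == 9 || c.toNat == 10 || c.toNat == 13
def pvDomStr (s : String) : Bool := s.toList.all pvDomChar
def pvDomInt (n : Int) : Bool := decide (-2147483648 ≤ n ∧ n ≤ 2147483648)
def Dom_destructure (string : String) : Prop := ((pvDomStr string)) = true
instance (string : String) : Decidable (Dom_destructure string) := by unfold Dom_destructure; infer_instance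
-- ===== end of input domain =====

-- B stages the count: one filtered count per class, third class by arithmetic (idiomatic reshaping, same results).

-- ===== PORT A =====
-- Python's special list holds 1-character strings; ported as the corresponding characters.
def destructure_special : List Char := "@!#$%^&*(){}[]\"'?</>|+=-_`~;:,.".toList

def destructure (string : String) : Int × Int × Int :=
  (string.toList.foldl
    (fun (acc : Int × Int × Int) char =>
      match PySem.Int.ofStr? (String.ofList [char]) with
      -- int(char) succeeded: in Python 'int(char) != char' compares an int with a str and is always True
      | some _ => (acc.1 + 1, acc.2.1, acc.2.2)
      | none =>
        if destructure_special.contains char then (acc.1, acc.2.1 + 1, acc.2.2)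
        else (acc.1, acc.2.1, acc.2.2 + 1))
    (0, 0, 0))

-- ===== PORT B =====
-- is_int(ch): int(ch) returns (True) or raises ValueError (False)
def destructure_isInt (ch : Char) : Bool := (PySem.Int.ofStr? (String.ofList [ch])).isSome

def destructure_specialSet : PySem.Set Char :=
  PySem.Set.ofList "@!#$%^&*(){}[]\"'?</>|+=-_`~;:,.".toList

def destructure_alt (string : String) : Int × Int × Int :=
  let cs := string.toList
  let numCount : Int := (cs.countP destructure_isInt : Nat)
  let specialCount : Int :=
    (cs.countP (fun ch => !destructure_isInt ch && PySem.Set.contains destructure_specialSet ch) : Nat)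
  (numCount, specialCount, (cs.length : Int) - numCount - specialCount)

-- ===== PRECONDITION & SPEC =====
def Spec_destructure (string : String) (out : Int × Int × Int) : Prop := out = destructure_alt string
instance (string : String) (out : Int × Int × Int) : Decidable (Spec_destructure string out) := by unfold Spec_destructure; infer_instance

-- ===== CLAIM (what is proved, stated in full; the proofs are below) =====
def Claim_equal_destructure : Prop := ∀ (string : String), Dom_destructure string → Spec_destructure string (destructure string)

-- ===== LEMMAS AND PROOFS =====

-- B's second class predicate, phrased over A's special list
def pvQ (c : Char) : Bool := !destructure_isInt c && destructure_special.contains c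

-- A's fold accumulates exactly the two counts and the remainder
theorem pv_foldA (cs : List Char) (a : Int × Int × Int) :
    cs.foldl
      (fun (acc : Int × Int × Int) char =>
        match PySem.Int.ofStr? (String.ofList [char]) with
        | some _ => (acc.1 + 1, acc.2.1, acc.2.2)
        | none =>
          if destructure_special.contains char then (acc.1, acc.2.1 + 1, acc.2.2)
          else (acc.1, acc.2.1, acc.2.2 + 1)) a
    = (a.1 + (cs.countP destructure_isInt : Nat),
       a.2.1 + (cs.countP pvQ : Nat),
       a.2.2 + ((cs.length : Int) - (cs.countP destructure_isInt : Nat) - (cs.countP pvQ : Nat))) := by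
  induction cs generalizing a with
  | nil => simp
  | cons c cs ih =>
    simp only [List.foldl_cons, List.countP_cons, List.length_cons]
    cases h : PySem.Int.ofStr? (String.ofList [c]) with
    | some n =>
      have hp : destructure_isInt c = true := by simp [destructure_isInt, h]
      have hq : pvQ c = false := by simp [pvQ, destructure_isInt, h]
      simp only [ih, hp, hq]
      refine Prod.ext ?_ (Prod.ext ?_ ?_) <;> simp <;> try (push_cast; ring)
    | none =>
      have hp : destructure_isInt c = false := by simp [destructure_isInt, h]
      by_cases hc : destructure_special.contains c = true
      · have hq : pvQ c = true := by
          simp [pvQ, hp, List.contains_iff_mem.mp hc]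
        simp only [hc, if_true, ih, hp, hq]
        refine Prod.ext ?_ (Prod.ext ?_ ?_) <;> simp <;> try (push_cast; ring)
      · have hq : pvQ c = false := by
          simp only [pvQ, Bool.and_eq_false_iff]
          right; simpa using hc
        simp only [hc, ih, hp, hq]
        refine Prod.ext ?_ (Prod.ext ?_ ?_) <;> simp <;> try (push_cast; ring)

-- ===== VERDICT (by name: the statement is the Claim_ definition above) =====
theorem destructure_spec : Claim_equal_destructure := by
  intro s _
  unfold Spec_destructure destructure destructure_alt
  rw [pv_foldA]
  have hq : s.toList.countP pvQ
      = s.toList.countP (fun ch => !destructure_isInt ch && PySem.Set.contains destructure_specialSet ch) :=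
    List.countP_congr (fun c _ => by simp [pvQ, destructure_special, destructure_specialSet, PySem.Set.mem_ofList])
  simp [hq]
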